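-- pv_equiv track=rewrite | github.com/jahirulislammolla/CodeFights | BotChallenges/KIk/kikCode.py | kikCode
-- ===== SOURCE A (Python) =====
-- def kikCode(userId):
--     x='{0:060b}'.format(int(userId))[-52:][::-1]
--     c=0
--     mm=1
--     result=[]
--     for i in [3,4,8,10,12,15]:
--         m=x[c:c+i]
--         d=[]
--         e={}
--         l=360//i
--         tt=0
--         for j in range(1,i+1):
--             if m[j-1]=="1":
--                 d+=[j]
--             e[j]=tt
--             tt+=l
--         if len(d)==i:
--             result.append([[mm,0],[mm,360]])
--         elif len(d)>0:
--             b=1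
--             if d[0]==1 and d[-1]==i:
--                 b+=i-1
--                 while b>0:
--                     if b in d:
--                         b-=1
--                     else:
--                         b+=1
--                         break
--             xx=[]
--             for j in range(b,b+i+1):
--                 pp=j
--                 if j>i:
--                     pp=j%i
--                 if pp in d:
--                     xx+=[pp]
--                 else:
--                     if len(xx)>0:
--                         result.append([[mm,e[xx[0]]],[mm,e[xx[0]]+len(xx)*l]])
--                     xx=[]
--         c+=i
--         mm+=1
--     return result
-- ===== SOURCE B (Python) =====
-- def kikCode(userId):
--     bits = '{0:060b}'.format(int(userId))[-52:][::-1]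
--     out = []
--     c = 0
--     mm = 0
--     for i in [3, 4, 8, 10, 12, 15]:
--         mm += 1
--         ring = bits[c:c + i]
--         c += i
--         l = 360 // i
--         if '0' not in ring:
--             out.append([[mm, 0], [mm, 360]])
--         elif '1' in ring:
--             runs = []
--             cur = []
--             for j in range(1, i + 1):
--                 if ring[j - 1] == '1':
--                     cur = cur + [j]
--                 else:
--                     if cur:
--                         runs.append(cur)
--                     cur = []
--             if cur:
--                 runs.append(cur)
--             if ring[0] == '1' and ring[-1] == '1':
--                 runs = [runs[-1] + runs[0]] + runs[1:-1]
--             for run in runs: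
--                 start = (run[0] - 1) * l
--                 out.append([[mm, start], [mm, start + len(run) * l]])
--     return out
-- ===== Notes on version B (the rewrite author's own statement) =====
-- stated objective: simpler
-- what changed: B decodes each ring by one linear scan that collects maximal runs of set bits and splices the wrap-around run to the front, instead of A's position list + angle dictionary + downward while-loop gap search + modular rotate-and-sweep with repeated membership tests.
import Mathlib
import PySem

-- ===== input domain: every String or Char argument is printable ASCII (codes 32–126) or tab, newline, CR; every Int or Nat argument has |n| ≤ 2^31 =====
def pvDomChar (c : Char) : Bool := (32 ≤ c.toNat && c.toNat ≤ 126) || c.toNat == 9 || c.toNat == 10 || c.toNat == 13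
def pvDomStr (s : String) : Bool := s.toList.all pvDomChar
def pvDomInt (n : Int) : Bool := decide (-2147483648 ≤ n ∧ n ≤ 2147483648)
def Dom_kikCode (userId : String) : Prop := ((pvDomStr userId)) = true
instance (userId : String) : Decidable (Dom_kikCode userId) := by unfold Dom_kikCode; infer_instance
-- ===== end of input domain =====

-- B re-implements the ring decoding by one linear scan collecting maximal runs (merging the
-- wrap-around run) instead of A's position set + angle dict + gap search + modular sweep;
-- objective: simpler. Equivalence is proved on inputs that int() accepts (Pre_).

-- ===== PORT A =====
-- shared helper: '{0:060b}'.format(int(userId))[-52:][::-1] (both Pythons start with this line)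
def pvNatBin (n : Nat) : List Char :=
  if h : n = 0 then [] else pvNatBin (n / 2) ++ [if n % 2 == 1 then '1' else '0']
  termination_by n
  decreasing_by exact Nat.div_lt_self (Nat.pos_of_ne_zero h) (by norm_num)

-- exact port of format(n, '060b'): binary digits of |n|, zero-padded to total width 60 (sign included)
def pvDigits (n : Int) : List Char :=
  if n.natAbs = 0 then ['0'] else pvNatBin n.natAbs

def pvFormat060b (n : Int) : List Char :=
  if n < 0 then '-' :: (List.replicate (59 - (pvDigits n).length) '0' ++ pvDigits n)
  else List.replicate (60 - (pvDigits n).length) '0' ++ pvDigits n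

def pvBits (userId : String) : List Char :=
  match PySem.Int.ofStr? userId with
  | none => []   -- int(userId) raises ValueError here; excluded by Pre_
  | some n => (PySem.List.slice (pvFormat060b n) (some (-52)) none).reverse

-- the 'while b>0: if b in d: b-=1 else: b+=1; break' loop (fuel makes it total; exact on fuel > iterations)
def kikFindB (d : List Int) : Int → Nat → Int
  | b, 0 => b
  | b, Nat.succ fuel => if b > 0 then (if d.contains b then kikFindB d (b - 1) fuel else b + 1) else b

-- body of A's 'for i in [...]' loop: the segments this ring appends to result
def kikRingA (mm i : Int) (m : List Char) : List (List (List Int)) :=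
  let l := PySem.Int.floordiv 360 i
  let s := (PySem.List.pyRange 1 (i + 1) 1).foldl
    (fun (s : List Int × PySem.Dict Int Int × Int) j =>
      (if PySem.List.pyGetD m (j - 1) ' ' == '1' then s.1 ++ [j] else s.1,
       s.2.1.insert j s.2.2,
       s.2.2 + l)) ([], PySem.Dict.empty, 0)
  let d := s.1
  let e := s.2.1
  if PySem.List.len d = i then [[[mm, 0], [mm, 360]]]
  else if PySem.List.len d > 0 then
    let b : Int := 1
    let b := if PySem.List.pyGetD d 0 0 == 1 && PySem.List.pyGetD d (-1) 0 == i then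
               kikFindB d (b + i - 1) ((b + i - 1).toNat + 1)
             else b
    let t := (PySem.List.pyRange b (b + i + 1) 1).foldl
      (fun (s : List Int × List (List (List Int))) j =>
        let pp := if j > i then PySem.Int.mod j i else j
        if d.contains pp then (s.1 ++ [pp], s.2)
        else if s.1.length > 0 then
          let a0 := PySem.Dict.getD e (PySem.List.pyGetD s.1 0 0) 0
          ([], s.2 ++ [[[mm, a0], [mm, a0 + (s.1.length : Int) * l]]])
        else ([], s.2)) ([], [])
    t.2
  else []

def kikCode (userId : String) : List (List (List Int)) :=
  let x := pvBits userId
  let s := [(3 : Int), 4, 8, 10, 12, 15].foldl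
    (fun (s : Int × Int × List (List (List Int))) i =>
      let m := PySem.List.slice x (some s.1) (some (s.1 + i))
      (s.1 + i, s.2.1 + 1, s.2.2 ++ kikRingA s.2.1 i m)) ((0 : Int), (1 : Int), [])
  s.2.2

-- ===== PORT B =====
def kikRingB (mm i : Int) (ring : List Char) : List (List (List Int)) :=
  let l := PySem.Int.floordiv 360 i
  if !ring.contains '0' then [[[mm, 0], [mm, 360]]]
  else if ring.contains '1' then
    let s := (PySem.List.pyRange 1 (i + 1) 1).foldl
      (fun (s : List (List Int) × List Int) j =>
        if PySem.List.pyGetD ring (j - 1) ' ' == '1' then (s.1, s.2 ++ [j])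
        else if s.2 ≠ [] then (s.1 ++ [s.2], ([] : List Int)) else (s.1, [])) ([], [])
    let runs := if s.2 ≠ [] then s.1 ++ [s.2] else s.1
    let runs :=
      if PySem.List.pyGetD ring 0 ' ' == '1' && PySem.List.pyGetD ring (-1) ' ' == '1' then
        (PySem.List.pyGetD runs (-1) [] ++ PySem.List.pyGetD runs 0 []) ::
          PySem.List.slice runs (some 1) (some (-1))
      else runs
    runs.map (fun run =>
      let start := (PySem.List.pyGetD run 0 0 - 1) * l
      [[mm, start], [mm, start + (run.length : Int) * l]])
  else []

def kikCode_alt (userId : String) : List (List (List Int)) :=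
  let bits := pvBits userId
  let s := [(3 : Int), 4, 8, 10, 12, 15].foldl
    (fun (s : Int × Int × List (List (List Int))) i =>
      let mm := s.2.1 + 1
      let ring := PySem.List.slice bits (some s.1) (some (s.1 + i))
      (s.1 + i, mm, s.2.2 ++ kikRingB mm i ring)) ((0 : Int), (0 : Int), [])
  s.2.2

-- ===== PRECONDITION & SPEC =====
-- Pre_ excludes exactly the strings int() rejects, where A raises ValueError.
def Pre_kikCode (userId : String) : Prop := (PySem.Int.ofStr? userId).isSome = true
instance (userId : String) : Decidable (Pre_kikCode userId) := by unfold Pre_kikCode; infer_instance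
def pvWitness_kikCode : String := "1234567"

def Spec_kikCode (userId : String) (out : List (List (List Int))) : Prop := out = kikCode_alt userId
instance (userId : String) (out : List (List (List Int))) : Decidable (Spec_kikCode userId out) := by unfold Spec_kikCode; infer_instance

-- ===== CLAIM (what is proved, stated in full; the proofs are below) =====
def Claim_equal_kikCode : Prop := ∀ (userId : String), Dom_kikCode userId → Pre_kikCode userId → Spec_kikCode userId (kikCode userId)

-- ===== LEMMAS AND PROOFS =====

-- ---- bits: alphabet and length ----
theorem pvNatBin_alpha (n : Nat) : ∀ c ∈ pvNatBin n, c = '0' ∨ c = '1' := by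
  induction n using Nat.strong_induction_on with
  | _ n ih =>
    intro c hc
    rw [pvNatBin] at hc
    split at hc
    · simp at hc
    · rename_i h
      rcases List.mem_append.1 hc with h1 | h1
      · exact ih (n / 2) (Nat.div_lt_self (Nat.pos_of_ne_zero h) (by norm_num)) c h1
      · simp only [List.mem_singleton] at h1
        subst h1
        split <;> simp

theorem pvDigits_alpha (n : Int) : ∀ c ∈ pvDigits n, c = '0' ∨ c = '1' := by
  unfold pvDigits
  split
  · simp
  · exact pvNatBin_alpha n.natAbs

theorem pvFormat_length (n : Int) : 60 ≤ (pvFormat060b n).length := by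
  unfold pvFormat060b
  split <;> simp <;> omega

theorem pvFormat_alpha (n : Int) (c : Char) (k : Nat) (hk : 1 ≤ k)
    (hc : c ∈ (pvFormat060b n).drop k) : c = '0' ∨ c = '1' := by
  unfold pvFormat060b at hc
  split at hc
  · obtain ⟨k', rfl⟩ : ∃ k', k = k' + 1 := ⟨k - 1, by omega⟩
    rw [List.drop_succ_cons] at hc
    have := List.mem_of_mem_drop hc
    rcases List.mem_append.1 this with h | h
    · left; exact List.eq_of_mem_replicate h
    · exact pvDigits_alpha n _ h
  · have := List.mem_of_mem_drop hc
    rcases List.mem_append.1 this with h | h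
    · left; exact List.eq_of_mem_replicate h
    · exact pvDigits_alpha n _ h

theorem pvBits_spec (u : String) (n : Int) (hn : PySem.Int.ofStr? u = some n) :
    (pvBits u).length = 52 ∧ ∀ c ∈ pvBits u, c = '0' ∨ c = '1' := by
  have hbv : pvBits u = (PySem.List.slice (pvFormat060b n) (some (-52)) none).reverse := by
    unfold pvBits
    rw [hn]
  have hlen := pvFormat_length n
  have hsl : PySem.List.slice (pvFormat060b n) (some (-52)) none
      = (pvFormat060b n).drop ((pvFormat060b n).length - 52) := by
    have := PySem.List.slice_from_neg_natCast (xs := pvFormat060b n) (k := 52) (by norm_num)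
    exact_mod_cast this
  rw [hbv, hsl]
  constructor
  · simp; omega
  · intro c hc
    exact pvFormat_alpha n c _ (by omega) (List.mem_reverse.1 hc)

-- ---- run-grouping machinery ----
def grStep (q : Int → Bool) (s : List (List Int) × List Int) (j : Int) : List (List Int) × List Int :=
  if q j then (s.1, s.2 ++ [j]) else if s.2 ≠ [] then (s.1 ++ [s.2], []) else (s.1, [])

def gr (q : Int → Bool) (s : List (List Int) × List Int) (ps : List Int) : List (List Int) × List Int :=
  ps.foldl (grStep q) s

theorem gr_nil (q : Int → Bool) (s : List (List Int) × List Int) : gr q s [] = s := rfl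

theorem gr_cons (q : Int → Bool) (s : List (List Int) × List Int) (x : Int) (ps : List Int) :
    gr q s (x :: ps) = gr q (grStep q s x) ps := rfl

theorem gr_append (q : Int → Bool) (s : List (List Int) × List Int) (ps qs : List Int) :
    gr q s (ps ++ qs) = gr q (gr q s ps) qs := List.foldl_append

theorem grStep_true (q : Int → Bool) (rs : List (List Int)) (cur : List Int) (x : Int) (hx : q x = true) :
    grStep q (rs, cur) x = (rs, cur ++ [x]) := by unfold grStep; rw [if_pos hx]

theorem grStep_true' (q : Int → Bool) (s : List (List Int) × List Int) (x : Int) (hx : q x = true) :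
    grStep q s x = (s.1, s.2 ++ [x]) := by unfold grStep; rw [if_pos hx]

theorem grStep_false_ne (q : Int → Bool) (rs : List (List Int)) (cur : List Int) (x : Int)
    (hx : q x = false) (hs : cur ≠ []) : grStep q (rs, cur) x = (rs ++ [cur], []) := by
  unfold grStep; rw [hx]; simp [hs]

theorem grStep_false_nil (q : Int → Bool) (s : List (List Int)) (x : Int)
    (hx : q x = false) : grStep q (s, []) x = (s, []) := by
  unfold grStep; rw [hx]; simp

theorem grStep_false (q : Int → Bool) (s : List (List Int) × List Int) (x : Int)
    (hx : q x = false) : grStep q s x = (if s.2 ≠ [] then s.1 ++ [s.2] else s.1, []) := by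
  unfold grStep
  rw [hx]
  simp only [Bool.false_eq_true, if_false]
  split <;> simp_all

theorem gr_all_true (q : Int → Bool) (ps : List Int) (h : ∀ j ∈ ps, q j = true) :
    ∀ (rs : List (List Int)) (cur : List Int), gr q (rs, cur) ps = (rs, cur ++ ps) := by
  induction ps with
  | nil => intro rs cur; simp [gr_nil]
  | cons x t ih =>
    intro rs cur
    rw [gr_cons, grStep_true q _ _ x (h x (by simp))]
    rw [ih (fun j hj => h j (by simp [hj])) rs (cur ++ [x])]
    simp

theorem gr_prepend (q : Int → Bool) (ps : List Int) :
    ∀ (rs : List (List Int)) (cur : List Int),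
      gr q (rs, cur) ps = (rs ++ (gr q ([], cur) ps).1, (gr q ([], cur) ps).2) := by
  induction ps with
  | nil => intro rs cur; simp [gr_nil]
  | cons x t ih =>
    intro rs cur
    rw [gr_cons, gr_cons]
    by_cases hx : q x = true
    · rw [grStep_true q _ _ x hx, grStep_true q _ _ x hx]
      exact ih rs (cur ++ [x])
    · simp only [Bool.not_eq_true] at hx
      by_cases hcur : cur = []
      · subst hcur
        rw [grStep_false_nil q rs x hx, grStep_false_nil q [] x hx]
        exact ih rs []
      · rw [grStep_false_ne q _ _ x hx hcur, grStep_false_ne q _ _ x hx hcur]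
        simp only [List.nil_append]
        rw [ih (rs ++ [cur]) [], ih [cur] []]
        simp
      
theorem gr_last_false (q : Int → Bool) (s : List (List Int) × List Int) (ps : List Int) (x : Int)
    (hx : q x = false) : (gr q s (ps ++ [x])).2 = [] := by
  rw [gr_append, gr_cons, gr_nil]
  unfold grStep
  rw [hx]
  simp only [Bool.false_eq_true, if_false]
  split <;> rfl

theorem gr_congr (q q' : Int → Bool) (ps : List Int) (h : ∀ j ∈ ps, q j = q' j) :
    ∀ s, gr q s ps = gr q' s ps := by
  induction ps with
  | nil => intro s; rfl
  | cons x t ih =>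
    intro s
    rw [gr_cons, gr_cons]
    have hx : grStep q s x = grStep q' s x := by unfold grStep; rw [h x (by simp)]
    rw [hx]
    exact ih (fun j hj => h j (by simp [hj])) _

-- sweep loop (flush-emitting) in terms of gr
def swStep (q : Int → Bool) (seg : List Int → List (List Int)) (s : List Int × List (List (List Int))) (j : Int) :
    List Int × List (List (List Int)) :=
  if q j then (s.1 ++ [j], s.2)
  else if s.1.length > 0 then ([], s.2 ++ [seg s.1])
  else ([], s.2)

theorem sw_eq_gr (q : Int → Bool) (seg : List Int → List (List Int)) (ps : List Int) :
    ∀ (xx : List Int) (res : List (List (List Int))),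
      ps.foldl (swStep q seg) (xx, res)
        = ((gr q ([], xx) ps).2, res ++ ((gr q ([], xx) ps).1).map seg) := by
  induction ps with
  | nil => intro xx res; simp [gr_nil]
  | cons x t ih =>
    intro xx res
    rw [List.foldl_cons, gr_cons]
    by_cases hx : q x = true
    · rw [grStep_true q _ _ x hx]
      have h1 : swStep q seg (xx, res) x = (xx ++ [x], res) := by unfold swStep; rw [if_pos hx]
      rw [h1]
      exact ih (xx ++ [x]) res
    · simp only [Bool.not_eq_true] at hx
      by_cases hcur : xx = []
      · subst hcur
        rw [grStep_false_nil q [] x hx]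
        have h1 : swStep q seg ([], res) x = ([], res) := by
          unfold swStep; rw [hx]; simp
        rw [h1]
        exact ih [] res
      · rw [grStep_false_ne q _ _ x hx hcur]
        have h1 : swStep q seg (xx, res) x = ([], res ++ [seg xx]) := by
          unfold swStep; rw [hx]; simp [List.length_pos_iff.2 hcur]
        rw [h1, ih [] (res ++ [seg xx])]
        simp only [List.nil_append]
        rw [gr_prepend q t [xx] []]
        simp

-- elements of runs produced by gr
theorem gr_sound (q : Int → Bool) (lo hi : Int) (ps : List Int) (hps : ∀ j ∈ ps, lo ≤ j ∧ j ≤ hi) :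
    ∀ (s : List (List Int) × List Int),
      (∀ r ∈ s.1, r ≠ [] ∧ ∀ x ∈ r, lo ≤ x ∧ x ≤ hi) →
      (∀ x ∈ s.2, lo ≤ x ∧ x ≤ hi) →
      (∀ r ∈ (gr q s ps).1, r ≠ [] ∧ ∀ x ∈ r, lo ≤ x ∧ x ≤ hi)
        ∧ ∀ x ∈ (gr q s ps).2, lo ≤ x ∧ x ≤ hi := by
  induction ps with
  | nil => intro s hs1 hs2; exact ⟨hs1, hs2⟩
  | cons a t ih =>
    rintro ⟨rs, cur⟩ hs1 hs2
    have ha := hps a (by simp)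
    have ht : ∀ j ∈ t, lo ≤ j ∧ j ≤ hi := fun j hj => hps j (by simp [hj])
    rw [gr_cons]
    by_cases hq : q a = true
    · rw [grStep_true q _ _ a hq]
      refine ih ht _ hs1 ?_
      intro x hx
      rcases List.mem_append.1 hx with h | h
      · exact hs2 x h
      · simp only [List.mem_singleton] at h; subst h; exact ha
    · simp only [Bool.not_eq_true] at hq
      by_cases hcur : cur = []
      · subst hcur
        rw [grStep_false_nil q rs a hq]
        exact ih ht _ hs1 (by simp)
      · rw [grStep_false_ne q _ _ a hq hcur]
        refine ih ht _ ?_ (by simp)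
        intro r hr
        rcases List.mem_append.1 hr with h | h
        · exact hs1 r h
        · simp only [List.mem_singleton] at h; subst h; exact ⟨hcur, hs2⟩

-- ---- the angle dict e ----
def eF (l : Int) (et : PySem.Dict Int Int × Int) (j : Int) : PySem.Dict Int Int × Int :=
  (et.1.insert j et.2, et.2 + l)

theorem eF_out (l : Int) : ∀ (n : Nat) (a : Int) (e0 : PySem.Dict Int Int) (tt0 j : Int),
    (j < a ∨ a + n ≤ j) →
    ((PySem.List.pyRange a (a + n) 1).foldl (eF l) (e0, tt0)).1.getD j 0 = e0.getD j 0 := by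
  intro n
  induction n with
  | zero => intro a e0 tt0 j _; simp [PySem.List.pyRange_one_eq_nil]
  | succ k ih =>
    intro a e0 tt0 j hj
    have hcons : PySem.List.pyRange a (a + (k + 1 : Nat)) 1 = a :: PySem.List.pyRange (a + 1) ((a + 1) + k) 1 := by
      rw [PySem.List.pyRange_one_cons (by push_cast; omega)]
      congr 1
      push_cast
      ring_nf
    rw [hcons]
    simp only [List.foldl_cons, eF]
    rw [ih (a + 1) _ _ j (by push_cast at hj ⊢; omega)]
    rw [PySem.Dict.getD_insert]
    rw [if_neg (by push_cast at hj; omega)]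

theorem eF_in (l : Int) : ∀ (n : Nat) (a : Int) (e0 : PySem.Dict Int Int) (tt0 j : Int),
    a ≤ j → j < a + n →
    ((PySem.List.pyRange a (a + n) 1).foldl (eF l) (e0, tt0)).1.getD j 0 = tt0 + (j - a) * l := by
  intro n
  induction n with
  | zero => intro a e0 tt0 j h1 h2; omega
  | succ k ih =>
    intro a e0 tt0 j h1 h2
    have hcons : PySem.List.pyRange a (a + (k + 1 : Nat)) 1 = a :: PySem.List.pyRange (a + 1) ((a + 1) + k) 1 := by
      rw [PySem.List.pyRange_one_cons (by push_cast; omega)]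
      congr 1
      push_cast
      ring_nf
    rw [hcons]
    simp only [List.foldl_cons, eF]
    by_cases hja : j = a
    · rw [hja]
      rw [eF_out l k (a + 1) _ _ a (by omega)]
      rw [PySem.Dict.getD_insert, if_pos rfl]
      ring
    · rw [ih (a + 1) _ _ j (by omega) (by push_cast at h2 ⊢; omega)]
      ring

-- ---- the b-search while loop ----
theorem kikFindB_spec (d : List Int) : ∀ (fuel : Nat) (b : Int), 0 ≤ b → b.toNat < fuel →
    (∃ g, 1 ≤ g ∧ g ≤ b ∧ d.contains g = false) →
    2 ≤ kikFindB d b fuel ∧ kikFindB d b fuel ≤ b + 1 ∧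
      d.contains (kikFindB d b fuel - 1) = false ∧
      ∀ k, kikFindB d b fuel ≤ k → k ≤ b → d.contains k = true := by
  intro fuel
  induction fuel with
  | zero => intro b _ h; omega
  | succ f ih =>
    rintro b hb0 hfuel ⟨g, hg1, hg2, hg3⟩
    have hbpos : b > 0 := by omega
    rw [kikFindB, if_pos (by omega)]
    by_cases hmem : d.contains b = true
    · rw [if_pos hmem]
      have hgb : g ≤ b - 1 := by
        rcases eq_or_ne g b with rfl | hne
        · rw [hg3] at hmem; cases hmem
        · omega
      obtain ⟨r1, r2, r3, r4⟩ := ih (b - 1) (by omega) (by omega) ⟨g, hg1, hgb, hg3⟩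
      refine ⟨r1, by omega, r3, ?_⟩
      intro k hk1 hk2
      rcases eq_or_ne k b with rfl | hne
      · exact hmem
      · exact r4 k hk1 (by omega)
    · rw [if_neg hmem]
      simp only [Bool.not_eq_true] at hmem
      exact ⟨by omega, by omega, by simpa using hmem, by omega⟩

-- ---- first gap above a set position ----
theorem firstGap (p : Int → Bool) : ∀ (n : Nat) (a : Int), p a = true →
    (∃ g, a ≤ g ∧ g ≤ a + n ∧ p g = false) →
    ∃ s, a ≤ s ∧ s < a + n ∧ (∀ k, a ≤ k → k ≤ s → p k = true) ∧ p (s + 1) = false := by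
  intro n
  induction n with
  | zero =>
    rintro a ha ⟨g, h1, h2, h3⟩
    have : g = a := by omega
    subst this
    rw [ha] at h3; cases h3
  | succ nn ih =>
    rintro a ha ⟨g, h1, h2, h3⟩
    by_cases ha1 : p (a + 1) = true
    · have hga : g ≠ a := fun h => by subst h; rw [ha] at h3; cases h3
      obtain ⟨s, s1, s2, s3, s4⟩ := ih (a + 1) ha1 ⟨g, by omega, by push_cast at h2 ⊢; omega, h3⟩
      refine ⟨s, by omega, by push_cast at s2 ⊢; omega, ?_, s4⟩
      intro k k1 k2
      rcases eq_or_ne k a with rfl | hne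
      · exact ha
      · exact s3 k (by omega) k2
    · refine ⟨a, le_refl a, by push_cast; omega, ?_, by simpa using ha1⟩
      intro k k1 k2
      have : k = a := by omega
      subst this; exact ha

-- ---- the pp position sequence of A's sweep ----
theorem pyRange_shift (a b c : Int) (hab : a ≤ b) :
    (PySem.List.pyRange a b 1).map (fun j => j + c) = PySem.List.pyRange (a + c) (b + c) 1 := by
  rw [PySem.List.pyRange_one, PySem.List.pyRange_one, List.map_map]
  have : (b + c - (a + c)).toNat = (b - a).toNat := by omega
  rw [this]
  apply List.map_congr_left
  intro k _
  simp only [Function.comp_apply]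
  ring

theorem ppList (i b : Int) (hb1 : 1 ≤ b) (hbi : b ≤ i) (hi : 3 ≤ i) :
    (PySem.List.pyRange b (b + i + 1) 1).map (fun j => if j > i then PySem.Int.mod j i else j)
      = PySem.List.pyRange b (i + 1) 1 ++ PySem.List.pyRange 1 b 1 ++ [if b = i then 0 else b] := by
  have hsplit : PySem.List.pyRange b (b + i + 1) 1
      = (PySem.List.pyRange b (i + 1) 1 ++ PySem.List.pyRange (i + 1) (b + i) 1) ++ [b + i] := by
    rw [show b + i + 1 = (b + i) + 1 from rfl, PySem.List.pyRange_one_succ_right (by omega),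
      PySem.List.pyRange_one_append b (i + 1) (b + i) (by omega) (by omega)]
  rw [hsplit, List.map_append, List.map_append]
  congr 1
  · congr 1
    · rw [List.map_congr_left (g := fun j => j), List.map_id']
      intro j hj
      rw [PySem.List.mem_pyRange_one] at hj
      simp only [if_neg (by omega : ¬ j > i)]
    · have hmap : ∀ j ∈ PySem.List.pyRange (i + 1) (b + i) 1,
          (if j > i then PySem.Int.mod j i else j) = j + (-i) := by
        intro j hj
        rw [PySem.List.mem_pyRange_one] at hj
        rw [if_pos (by omega)]
        rw [PySem.Int.mod_eq_emod_of_pos (by omega)]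
        have h1 : j = (j - i) + i * 1 := by ring
        rw [h1, Int.add_mul_emod_self_left]
        rw [Int.emod_eq_of_lt (by omega) (by omega)]
        ring
      rw [List.map_congr_left hmap, pyRange_shift _ _ _ (by omega)]
      congr 1 <;> ring
  · simp only [List.map_cons, List.map_nil]
    congr 1
    rw [if_pos (by omega : b + i > i)]
    rw [PySem.Int.mod_eq_emod_of_pos (by omega)]
    rcases eq_or_ne b i with rfl | hne
    · rw [if_pos rfl]
      have : b + b = 0 + b * 2 := by ring
      rw [this, Int.add_mul_emod_self_left]
      simp
    · rw [if_neg hne]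
      have h1 : b + i = b + i * 1 := by ring
      rw [h1, Int.add_mul_emod_self_left, Int.emod_eq_of_lt (by omega) (by omega)]

-- slice xs[1:-1] on an explicitly decomposed list
theorem slice_one_negone (x : List Int) (mid : List (List Int)) (y : List Int) :
    PySem.List.slice (x :: (mid ++ [y])) (some 1) (some (-1)) = mid := by
  simp only [PySem.List.slice, PySem.List.clampIdx]
  norm_num
  rw [if_neg (by omega)]
  have h1 : mid.length + 1 - 1 = mid.length := by omega
  rw [h1, List.take_left]

-- B's run-collecting fold is gr
theorem grB_eq (m : List Char) (ps : List Int) :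
    List.foldl (fun (s : List (List Int) × List Int) j =>
        if (PySem.List.pyGetD m (j - 1) ' ' == '1') = true then (s.1, s.2 ++ [j])
        else if s.2 ≠ [] then (s.1 ++ [s.2], ([] : List Int)) else (s.1, [])) ([], []) ps
      = gr (fun j => PySem.List.pyGetD m (j - 1) ' ' == '1') ([], []) ps := rfl

-- A's sweep fold is swStep over the pp-mapped positions
theorem swA_eq (d : List Int) (e : PySem.Dict Int Int) (mm l i : Int) (ps : List Int) :
    List.foldl (fun (s : List Int × List (List (List Int))) j =>
        if d.contains (if j > i then PySem.Int.mod j i else j) = true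
        then (s.1 ++ [if j > i then PySem.Int.mod j i else j], s.2)
        else if s.1.length > 0 then
          ([], s.2 ++ [[[mm, PySem.Dict.getD e (PySem.List.pyGetD s.1 0 0) 0],
            [mm, PySem.Dict.getD e (PySem.List.pyGetD s.1 0 0) 0 + (s.1.length : Int) * l]]])
        else ([], s.2)) ([], []) ps
      = (ps.map (fun j => if j > i then PySem.Int.mod j i else j)).foldl
          (swStep (fun z => d.contains z)
            (fun xs => [[mm, PySem.Dict.getD e (PySem.List.pyGetD xs 0 0) 0],
              [mm, PySem.Dict.getD e (PySem.List.pyGetD xs 0 0) 0 + (xs.length : Int) * l]])) ([], []) := by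
  rw [List.foldl_map]
  rfl

theorem pyGetD_zero_cons {α : Type} (x : α) (xs : List α) (dflt : α) :
    PySem.List.pyGetD (x :: xs) 0 dflt = x := by
  rw [PySem.List.pyGetD_eq_getElem _ dflt (by norm_num) (by simp)]
  rfl

theorem pyGetD_concat_last {α : Type} (xs : List α) (y : α) (dflt : α) :
    PySem.List.pyGetD (xs ++ [y]) (-1) dflt = y := by
  rw [PySem.List.pyGetD_neg_ofNat _ 1 dflt (by norm_num) (by simp)]
  simp

set_option maxRecDepth 8192 in
theorem ring_eq (mm i : Int) (hi : 3 ≤ i) (m : List Char)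
    (hlen : m.length = i.toNat) (halph : ∀ c ∈ m, c = '0' ∨ c = '1') :
    kikRingA mm i m = kikRingB mm i m := by
  simp only [kikRingA, kikRingB]
  have hDE : List.foldl (fun (s : List Int × PySem.Dict Int Int × Int) j =>
        (if (PySem.List.pyGetD m (j - 1) ' ' == '1') = true then s.1 ++ [j] else s.1,
         s.2.1.insert j s.2.2, s.2.2 + PySem.Int.floordiv 360 i)) ([], PySem.Dict.empty, 0)
        (PySem.List.pyRange 1 (i + 1))
      = ((PySem.List.pyRange 1 (i + 1)).filter (fun j => PySem.List.pyGetD m (j - 1) ' ' == '1'),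
         (List.foldl (eF (PySem.Int.floordiv 360 i)) (PySem.Dict.empty, 0) (PySem.List.pyRange 1 (i + 1))).1,
         (List.foldl (eF (PySem.Int.floordiv 360 i)) (PySem.Dict.empty, 0) (PySem.List.pyRange 1 (i + 1))).2) := by
    refine Eq.trans (PySem.List.foldl_prod_mk
      (fun (dd : List Int) j => if (PySem.List.pyGetD m (j - 1) ' ' == '1') = true then dd ++ [j] else dd)
      (eF (PySem.Int.floordiv 360 i)) (PySem.List.pyRange 1 (i + 1)) [] (PySem.Dict.empty, 0)) ?_
    rw [PySem.List.foldl_append_if_eq_filter]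
    simp
  rw [hDE, grB_eq]
  dsimp only
  rw [swA_eq]
  set p : Int → Bool := fun j => PySem.List.pyGetD m (j - 1) ' ' == '1' with hp
  set l : Int := PySem.Int.floordiv 360 i with hl
  set rng : List Int := PySem.List.pyRange 1 (i + 1) with hrng
  set D : List Int := rng.filter p with hD
  set E : PySem.Dict Int Int := (List.foldl (eF l) (PySem.Dict.empty, 0) rng).1 with hE
  clear hDE
  have hmlen : m.length = i.toNat := hlen
  have hilen : rng.length = i.toNat := by
    rw [hrng, PySem.List.length_pyRange_one]
    omega
  have hpj : ∀ (k : Nat) (hk : k < m.length), p ((k : Int) + 1) = (m[k]'hk == '1') := by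
    intro k hk
    rw [hp]
    have h1 : ((k : Int) + 1 - 1) = (k : Int) := by omega
    simp only [h1, PySem.List.pyGetD_natCast]
    rw [List.getD_eq_getElem _ _ hk]
  have hjk : ∀ (j : Int), 1 ≤ j → j ≤ i → ∃ (k : Nat), k < m.length ∧ j = (k : Int) + 1 := by
    intro j h1 h2
    exact ⟨(j - 1).toNat, by omega, by omega⟩
  have F_all : (∀ j ∈ rng, p j = true) ↔ ('0' ∉ m) := by
    constructor
    · intro hall hmem
      obtain ⟨k, hk, hmk⟩ := List.mem_iff_getElem.1 hmem
      have hjr : ((k : Int) + 1) ∈ rng := by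
        rw [hrng, PySem.List.mem_pyRange_one]
        omega
      have := hall _ hjr
      rw [hpj k hk, hmk] at this
      simp at this
    · intro h0 j hj
      rw [hrng, PySem.List.mem_pyRange_one] at hj
      obtain ⟨k, hk, rfl⟩ := hjk j hj.1 (by omega)
      rw [hpj k hk]
      have hm := List.getElem_mem hk
      rcases halph _ hm with h | h
      · exact absurd (h ▸ hm) h0
      · simp [h]
  have F_ex : (∃ j ∈ rng, p j = true) ↔ ('1' ∈ m) := by
    constructor
    · rintro ⟨j, hj, hpjt⟩
      rw [hrng, PySem.List.mem_pyRange_one] at hj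
      obtain ⟨k, hk, rfl⟩ := hjk j hj.1 (by omega)
      rw [hpj k hk] at hpjt
      have := List.getElem_mem hk
      rwa [(beq_iff_eq.1 hpjt)] at this
    · intro hmem
      obtain ⟨k, hk, hmk⟩ := List.mem_iff_getElem.1 hmem
      refine ⟨(k : Int) + 1, by rw [hrng, PySem.List.mem_pyRange_one]; omega, ?_⟩
      rw [hpj k hk, hmk]
      simp
  by_cases hall : ∀ j ∈ rng, p j = true
  · have hA : PySem.List.len D = i := by
      rw [PySem.List.len_eq, hD]
      have := List.length_filter_eq_length_iff.2 hall
      rw [hrng] at this ⊢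
      rw [this]
      rw [hrng] at hilen
      omega
    have h0m : '0' ∉ m := F_all.1 hall
    have hB : (!m.contains '0') = true := by
      simp only [Bool.not_eq_true']
      rw [← Bool.not_eq_true, List.contains_iff_mem]
      exact h0m
    rw [if_pos hA, if_pos hB]
  · have hAne : ¬ PySem.List.len D = i := by
      rw [PySem.List.len_eq]
      have hle : D.length ≤ rng.length := by rw [hD]; exact List.length_filter_le _ _
      have hne : D.length ≠ rng.length := by
        intro h
        exact hall (List.length_filter_eq_length_iff.1 (by rw [hD] at h; exact h))
      omega
    have h0m : '0' ∈ m := by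
      by_contra h0
      exact hall (F_all.2 h0)
    have hB : ¬ ((!m.contains '0') = true) := by
      simp [h0m]
    rw [if_neg hAne, if_neg hB]
    by_cases hsome : ∃ j ∈ rng, p j = true
    · have hDne : D ≠ [] := by
        rw [hD]
        intro h
        obtain ⟨j, hj, hpjt⟩ := hsome
        exact absurd hpjt (by simpa using (List.filter_eq_nil_iff.1 h) j hj)
      have hApos : PySem.List.len D > 0 := by
        rw [PySem.List.len_eq]
        have := List.length_pos_iff.2 hDne
        omega
      have h1m : '1' ∈ m := F_ex.1 hsome
      have hB1 : (m.contains '1') = true := List.contains_iff_mem.2 h1m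
      rw [if_pos hApos, if_pos hB1]
      -- membership in D
      have hmemD : ∀ j : Int, j ∈ D ↔ ((1 ≤ j ∧ j < i + 1) ∧ p j = true) := by
        intro j
        rw [hD, List.mem_filter, hrng, PySem.List.mem_pyRange_one]
      have hcontD : ∀ j : Int, D.contains j = true ↔ (1 ≤ j ∧ j ≤ i ∧ p j = true) := by
        intro j
        rw [List.contains_iff_mem, hmemD]
        constructor
        · rintro ⟨⟨a, b⟩, c⟩; exact ⟨a, by omega, c⟩
        · rintro ⟨a, b, c⟩; exact ⟨⟨a, by omega⟩, c⟩
      have hcontD' : ∀ j : Int, 1 ≤ j → j ≤ i → D.contains j = p j := by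
        intro j h1 h2
        cases hpv : p j with
        | true => exact (hcontD j).2 ⟨h1, h2, hpv⟩
        | false =>
          rw [← Bool.not_eq_true]
          intro hc
          rw [((hcontD j).1 hc).2.2] at hpv
          cases hpv
      have hcontD0 : ∀ j : Int, j < 1 ∨ i < j → D.contains j = false := by
        intro j hj
        rw [← Bool.not_eq_true]
        intro hc
        have := (hcontD j).1 hc
        omega
      -- E lookups
      have hEgetD : ∀ j : Int, 1 ≤ j → j ≤ i → E.getD j 0 = (j - 1) * l := by
        intro j h1 h2
        rw [hE, hrng]
        have hcast : (i : Int) + 1 = 1 + ((i.toNat : Nat) : Int) := by omega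
        rw [hcast]
        rw [eF_in l i.toNat 1 PySem.Dict.empty 0 j h1 (by omega)]
        ring
      have hmapeq : ∀ (runs : List (List Int)), (∀ r ∈ runs, r ≠ [] ∧ ∀ x ∈ r, 1 ≤ x ∧ x ≤ i) →
          runs.map (fun xs => [[mm, E.getD (PySem.List.pyGetD xs 0 0) 0],
            [mm, E.getD (PySem.List.pyGetD xs 0 0) 0 + (xs.length : Int) * l]])
            = runs.map (fun run => [[mm, (PySem.List.pyGetD run 0 0 - 1) * l],
              [mm, (PySem.List.pyGetD run 0 0 - 1) * l + (run.length : Int) * l]]) := by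
        intro runs hr
        apply List.map_congr_left
        intro r hrr
        obtain ⟨hne, hbound⟩ := hr r hrr
        obtain ⟨h0, r', rfl⟩ := List.exists_cons_of_ne_nil hne
        rw [pyGetD_zero_cons]
        have hb := hbound h0 List.mem_cons_self
        rw [hEgetD h0 hb.1 hb.2]
      -- head and last of D
      have hhead : (PySem.List.pyGetD D 0 0 == 1) = p 1 := by
        by_cases hp1 : p 1 = true
        · have hDc : D = 1 :: (PySem.List.pyRange 2 (i + 1)).filter p := by
            rw [hD, hrng, PySem.List.pyRange_one_cons (by omega), List.filter_cons, if_pos hp1]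
            norm_num
          rw [hDc, pyGetD_zero_cons]
          rw [hp1]
          rfl
        · have hDc : D = (PySem.List.pyRange 2 (i + 1)).filter p := by
            rw [hD, hrng, PySem.List.pyRange_one_cons (by omega), List.filter_cons, if_neg hp1]
            norm_num
          obtain ⟨d0, D', hD0⟩ := List.exists_cons_of_ne_nil hDne
          have hd0 : d0 ∈ D := by rw [hD0]; exact List.mem_cons_self
          have : d0 ∈ PySem.List.pyRange 2 (i + 1) := by
            rw [hDc] at hd0
            exact (List.mem_filter.1 hd0).1
          rw [PySem.List.mem_pyRange_one] at this
          rw [hD0, pyGetD_zero_cons]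
          have hne1 : (d0 == (1 : Int)) = false := by
            simp only [beq_eq_false_iff_ne, ne_eq]
            omega
          rw [hne1, eq_comm, ← Bool.not_eq_true]
          exact hp1
      have hlast : (PySem.List.pyGetD D (-1) 0 == i) = p i := by
        have hsplit : D = (PySem.List.pyRange 1 i).filter p ++ (if p i = true then [i] else []) := by
          rw [hD, hrng, show (i : Int) + 1 = i + 1 from rfl, PySem.List.pyRange_one_succ_right (by omega),
            List.filter_append]
          congr 1
          rw [List.filter_cons, List.filter_nil]
        by_cases hpi : p i = true
        · rw [hsplit, if_pos hpi, pyGetD_concat_last]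
          rw [hpi, beq_self_eq_true]
        · rw [hsplit, if_neg hpi] at hDne ⊢
          simp only [List.append_nil] at hDne ⊢
          rw [← List.dropLast_append_getLast hDne, pyGetD_concat_last]
          have hmem : ((PySem.List.pyRange 1 i).filter p).getLast hDne ∈ PySem.List.pyRange 1 i :=
            (List.mem_filter.1 (List.getLast_mem hDne)).1
          rw [PySem.List.mem_pyRange_one] at hmem
          have hne : (((PySem.List.pyRange 1 i).filter p).getLast hDne == i) = false := by
            simp only [beq_eq_false_iff_ne, ne_eq]
            omega
          rw [hne, eq_comm, ← Bool.not_eq_true]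
          exact hpi
      rw [hhead, hlast]
      have F3 : (PySem.List.pyGetD m 0 ' ' == '1') = p 1 := by
        have h0 := hpj 0 (by omega)
        have : PySem.List.pyGetD m 0 ' ' = m[0]'(by omega) := by
          rw [PySem.List.pyGetD_eq_getElem _ _ (by norm_num) (by omega)]
          rfl
        rw [this]
        rw [show ((0 : Nat) : Int) + 1 = 1 from by norm_num] at h0
        rw [h0]
      have F4 : (PySem.List.pyGetD m (-1) ' ' == '1') = p i := by
        obtain ⟨k, hk, hik⟩ := hjk i (by omega) le_rfl
        have h0 := hpj k hk
        rw [← hik] at h0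
        have hkval : k = m.length - 1 := by omega
        subst hkval
        rw [PySem.List.pyGetD_neg_ofNat _ 1 ' ' (by norm_num) (by omega), h0]
      rw [F3, F4]
      by_cases hw : (p 1 && p i) = true
      · rw [if_pos hw, if_pos hw]
        have hw' : p 1 = true ∧ p i = true := by
          simpa [Bool.and_eq_true] using hw
        have hw1 : p 1 = true := hw'.1
        have hwi : p i = true := hw'.2
        obtain ⟨g, hgmem, hpg'⟩ : ∃ j ∈ rng, ¬ p j = true := by
          by_contra hc
          push_neg at hc
          exact hall hc
        have hpg : p g = false := by
          cases hv : p g with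
          | false => rfl
          | true => exact absurd hv hpg'
        rw [hrng, PySem.List.mem_pyRange_one] at hgmem
        have hgD : D.contains g = false := by
          cases hv : D.contains g with
          | false => rfl
          | true => rw [((hcontD g).1 hv).2.2] at hpg; cases hpg
        rw [show (1 : Int) + i - 1 = i from by omega]
        obtain ⟨ht2, htle, htgap, htall⟩ :=
          kikFindB_spec D (i.toNat + 1) i (by omega) (by omega) ⟨g, hgmem.1, by omega, hgD⟩
        set t := kikFindB D i (i.toNat + 1) with hT
        have hti : t ≤ i := by
          by_contra hc
          have h2 : D.contains (t - 1) = true := by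
            rw [show t - 1 = i from by omega]
            exact (hcontD i).2 ⟨by omega, le_rfl, hwi⟩
          rw [htgap] at h2
          cases h2
        have hptall : ∀ k, t ≤ k → k ≤ i → p k = true := fun k h1 h2 =>
          ((hcontD k).1 (htall k h1 h2)).2.2
        have hptgap : p (t - 1) = false := by
          cases hv : p (t - 1) with
          | false => rfl
          | true =>
            have hc : D.contains (t - 1) = true := (hcontD (t - 1)).2 ⟨by omega, by omega, hv⟩
            rw [htgap] at hc
            cases hc
        have hcast1 : (1 : Int) + ((i.toNat - 1 : Nat) : Int) = i := by omega
        obtain ⟨sv, hs1, hslt, hsall, hsgap⟩ :=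
          firstGap p (i.toNat - 1) 1 hw1 ⟨g, by omega, by rw [hcast1]; omega, hpg⟩
        rw [hcast1] at hslt
        have hs2t : sv + 2 ≤ t := by
          by_contra hc
          have hx : p (sv + 1) = true := hptall (sv + 1) (by omega) (by omega)
          rw [hsgap] at hx
          cases hx
        set R1s := PySem.List.pyRange 1 (sv + 1) with hR1s
        set Rti := PySem.List.pyRange t (i + 1) with hRtiDef
        set mid := PySem.List.pyRange (sv + 2) t with hmid
        set G := gr p ([], []) mid with hG
        have hRti_cons : Rti = t :: PySem.List.pyRange (t + 1) (i + 1) :=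
          PySem.List.pyRange_one_cons (by omega)
        have hRti_ne : Rti ≠ [] := by rw [hRti_cons]; simp
        have hR1s_cons : R1s = 1 :: PySem.List.pyRange 2 (sv + 1) := by
          rw [hR1s, PySem.List.pyRange_one_cons (by omega)]
          norm_num
        have hR1s_ne : R1s ≠ [] := by rw [hR1s_cons]; simp
        have hsplit1t : PySem.List.pyRange 1 t = R1s ++ ([sv + 1] ++ mid) := by
          rw [PySem.List.pyRange_one_append 1 (sv + 1) t (by omega) (by omega)]
          congr 1
          rw [PySem.List.pyRange_one_append (sv + 1) (sv + 2) t (by omega) (by omega)]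
          congr 1
          rw [show (sv : Int) + 2 = (sv + 1) + 1 from by ring]
          exact PySem.List.pyRange_one_singleton _
        have hmidbnd : ∀ j ∈ mid, sv + 2 ≤ j ∧ j ≤ t - 1 := by
          intro j hj
          rw [hmid, PySem.List.mem_pyRange_one] at hj
          omega
        have hG2 : G.2 = [] := by
          rw [hG]
          by_cases hmidlt : sv + 2 < t
          · have hsp : mid = PySem.List.pyRange (sv + 2) (t - 1) ++ [t - 1] := by
              have h := PySem.List.pyRange_one_succ_right (a := sv + 2) (b := t - 1) (by omega)
              rw [show t - 1 + 1 = t from by ring] at h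
              rw [hmid, h]
            rw [hsp]
            exact gr_last_false p _ _ _ hptgap
          · rw [hmid, PySem.List.pyRange_one_eq_nil (by omega), gr_nil]
        have hGsound := gr_sound p (sv + 2) (t - 1) mid hmidbnd ([], []) (by simp) (by simp)
        -- A side
        have hpp := ppList i t (by omega) hti hi
        rw [hpp, sw_eq_gr]
        dsimp only
        simp only [List.nil_append]
        rw [gr_append, gr_append]
        have hqRti : ∀ j ∈ Rti, (fun z => D.contains z) j = true := by
          intro j hj
          rw [hRtiDef, PySem.List.mem_pyRange_one] at hj
          exact htall j hj.1 (by omega)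
        rw [gr_all_true _ _ hqRti [] []]
        simp only [List.nil_append]
        rw [hsplit1t, gr_append, gr_append]
        have hqR1s : ∀ j ∈ R1s, (fun z => D.contains z) j = true := by
          intro j hj
          rw [hR1s, PySem.List.mem_pyRange_one] at hj
          exact (hcontD j).2 ⟨hj.1, by omega, hsall j hj.1 (by omega)⟩
        rw [gr_all_true _ _ hqR1s [] _]
        have hqsv1 : (fun z => D.contains z) (sv + 1) = false := by
          show D.contains (sv + 1) = false
          cases hv : D.contains (sv + 1) with
          | false => rfl
          | true => rw [((hcontD _).1 hv).2.2] at hsgap; cases hsgap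
        have hstep1 : gr (fun z => D.contains z) ([], Rti ++ R1s) [sv + 1] = ([Rti ++ R1s], []) := by
          rw [gr_cons, gr_nil, grStep_false_ne _ _ _ _ hqsv1 (by simp [hRti_ne])]
          simp
        rw [hstep1]
        have hqmid : ∀ j ∈ mid, (fun z => D.contains z) j = p j := by
          intro j hj
          have hb := hmidbnd j hj
          exact hcontD' j (by omega) (by omega)
        rw [gr_congr _ p _ hqmid, gr_prepend p mid [Rti ++ R1s] [], ← hG]
        have hsent1 : (gr (fun z => D.contains z) ([Rti ++ R1s] ++ G.1, G.2)
            [if t = i then 0 else t]).1 = [Rti ++ R1s] ++ G.1 := by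
          by_cases htieq : t = i
          · rw [if_pos htieq, gr_cons, gr_nil, hG2,
              grStep_false_nil _ _ _ (hcontD0 0 (by omega))]
          · rw [if_neg htieq, gr_cons, gr_nil,
              grStep_true' _ _ _ (htall t le_rfl hti)]
        rw [hsent1]
        -- B side
        have hH : gr p ([], []) rng = (R1s :: G.1, Rti) := by
          have hrsp : rng = (R1s ++ ([sv + 1] ++ mid)) ++ Rti := by
            rw [hrng, PySem.List.pyRange_one_append 1 t (i + 1) (by omega) (by omega), hsplit1t]
          rw [hrsp, gr_append, gr_append, gr_append]
          have hpR1s : ∀ j ∈ R1s, p j = true := by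
            intro j hj
            rw [hR1s, PySem.List.mem_pyRange_one] at hj
            exact hsall j hj.1 (by omega)
          rw [gr_all_true p _ hpR1s [] []]
          simp only [List.nil_append]
          rw [gr_cons, gr_nil, grStep_false_ne p _ _ _ hsgap hR1s_ne]
          simp only [List.nil_append]
          rw [gr_prepend p mid [R1s] [], ← hG]
          have hpRti : ∀ j ∈ Rti, p j = true := by
            intro j hj
            rw [hRtiDef, PySem.List.mem_pyRange_one] at hj
            exact hptall j hj.1 (by omega)
          rw [gr_all_true p _ hpRti _ _, hG2]
          simp only [List.nil_append, List.singleton_append]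
        rw [hH]
        dsimp only
        rw [if_pos hRti_ne, pyGetD_concat_last, List.cons_append (a := R1s) (as := G.1) (bs := [Rti])]
        rw [pyGetD_zero_cons R1s (G.1 ++ [Rti]) ([] : List Int)]
        rw [slice_one_negone]
        simp only [List.singleton_append]
        refine hmapeq _ ?_
        intro r hr
        rcases List.mem_cons.1 hr with h | h
        · subst h
          refine ⟨by simp [hRti_ne], ?_⟩
          intro x hx
          rcases List.mem_append.1 hx with h2 | h2
          · rw [hRtiDef, PySem.List.mem_pyRange_one] at h2
            omega
          · rw [hR1s, PySem.List.mem_pyRange_one] at h2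
            omega
        · obtain ⟨hne2, hb⟩ := hGsound.1 r h
          refine ⟨hne2, ?_⟩
          intro x hx
          have := hb x hx
          omega
      · rw [if_neg hw, if_neg hw]
        have hpp := ppList i 1 (by omega) (by omega) hi
        rw [if_neg (show ¬ (1 : Int) = i by omega)] at hpp
        rw [PySem.List.pyRange_one_eq_nil (le_refl 1)] at hpp
        simp only [List.append_nil] at hpp
        rw [hpp, sw_eq_gr]
        dsimp only
        simp only [List.nil_append]
        have hqp : ∀ j ∈ (PySem.List.pyRange 1 (i + 1)) ++ [1], (fun z => D.contains z) j = p j := by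
          intro j hj
          rcases List.mem_append.1 hj with h | h
          · rw [PySem.List.mem_pyRange_one] at h
            exact hcontD' j h.1 (by omega)
          · simp only [List.mem_singleton] at h
            subst h
            exact hcontD' 1 (by omega) (by omega)
        rw [gr_congr _ p _ hqp, gr_append, ← hrng, gr_cons, gr_nil]
        have hbnd : ∀ j ∈ rng, 1 ≤ j ∧ j ≤ i := by
          intro j hj
          rw [hrng, PySem.List.mem_pyRange_one] at hj
          omega
        have hsound := gr_sound p 1 i rng hbnd ([], []) (by simp) (by simp)
        by_cases hp1 : p 1 = true
        · have hpi : p i = false := by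
            cases hv : p i with
            | false => rfl
            | true => exact absurd (by rw [hp1, hv]; rfl) hw
          have hH2 : (gr p ([], []) rng).2 = [] := by
            have hsp : rng = PySem.List.pyRange 1 i ++ [i] := by
              rw [hrng, PySem.List.pyRange_one_succ_right (by omega)]
            rw [hsp]
            exact gr_last_false p _ _ i hpi
          rw [grStep_true' p _ 1 hp1]
          dsimp only
          have hcond : ¬ ((gr p ([], []) rng).2 ≠ []) := by
            rw [hH2]
            simp
          rw [if_neg hcond]
          exact hmapeq _ hsound.1
        · have hp1f : p 1 = false := by
            cases hv : p 1 with
            | false => rfl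
            | true => exact absurd hv hp1
          rw [grStep_false p _ 1 hp1f]
          dsimp only
          split
          · refine hmapeq _ ?_
            intro r hr
            rcases List.mem_append.1 hr with h | h
            · exact hsound.1 r h
            · simp only [List.mem_singleton] at h
              subst h
              rename_i hne2
              exact ⟨hne2, hsound.2⟩
          · exact hmapeq _ hsound.1
    · have hDnil : D = [] := by
        rw [hD]
        exact List.filter_eq_nil_iff.2 (by intro a ha hpa; exact hsome ⟨a, ha, hpa⟩)
      have hA0 : ¬ PySem.List.len D > 0 := by
        rw [PySem.List.len_eq, hDnil]
        simp
      have h1m : '1' ∉ m := fun h => hsome (F_ex.2 h)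
      have hB1 : ¬ ((m.contains '1') = true) := by
        rw [List.contains_iff_mem]
        exact h1m
      rw [if_neg hA0, if_neg hB1]

-- ===== VERDICT (by name: the statement is the Claim_ definition above) =====
theorem kikCode_spec : Claim_equal_kikCode := by
  intro u _ hpre
  unfold Spec_kikCode
  obtain ⟨n, hn⟩ := Option.isSome_iff_exists.1 hpre
  obtain ⟨hblen, hbalph⟩ := pvBits_spec u n hn
  simp only [kikCode, kikCode_alt, List.foldl]
  norm_num
  have hmemslice : ∀ (a b : Option Int) (c : Char), c ∈ PySem.List.slice (pvBits u) a b → c ∈ pvBits u := by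
    intro a b c hc
    simp only [PySem.List.slice] at hc
    exact List.mem_of_mem_drop (List.mem_of_mem_take hc)
  have halph : ∀ (a b : Option Int), ∀ c ∈ PySem.List.slice (pvBits u) a b, c = '0' ∨ c = '1' :=
    fun a b c hc => hbalph c (hmemslice a b c hc)
  have hl1 : (PySem.List.slice (pvBits u) none (some 3)).length = 3 := by
    rw [PySem.List.slice_to (pvBits u) (b := 3) (by norm_num)]
    simp [hblen]
  have e2 : PySem.List.slice (pvBits u) (some 3) (some 7) = ((pvBits u).drop 3).take 4 := by
    have h := PySem.List.slice_natCast (xs := pvBits u) (a := 3) (b := 7)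
    norm_num at h
    exact_mod_cast h
  have e3 : PySem.List.slice (pvBits u) (some 7) (some 15) = ((pvBits u).drop 7).take 8 := by
    have h := PySem.List.slice_natCast (xs := pvBits u) (a := 7) (b := 15)
    norm_num at h
    exact_mod_cast h
  have e4 : PySem.List.slice (pvBits u) (some 15) (some 25) = ((pvBits u).drop 15).take 10 := by
    have h := PySem.List.slice_natCast (xs := pvBits u) (a := 15) (b := 25)
    norm_num at h
    exact_mod_cast h
  have e5 : PySem.List.slice (pvBits u) (some 25) (some 37) = ((pvBits u).drop 25).take 12 := by
    have h := PySem.List.slice_natCast (xs := pvBits u) (a := 25) (b := 37)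
    norm_num at h
    exact_mod_cast h
  have e6 : PySem.List.slice (pvBits u) (some 37) (some 52) = ((pvBits u).drop 37).take 15 := by
    have h := PySem.List.slice_natCast (xs := pvBits u) (a := 37) (b := 52)
    norm_num at h
    exact_mod_cast h
  have hl2 : (PySem.List.slice (pvBits u) (some 3) (some 7)).length = 4 := by
    rw [e2]; simp [hblen]
  have hl3 : (PySem.List.slice (pvBits u) (some 7) (some 15)).length = 8 := by
    rw [e3]; simp [hblen]
  have hl4 : (PySem.List.slice (pvBits u) (some 15) (some 25)).length = 10 := by
    rw [e4]; simp [hblen]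
  have hl5 : (PySem.List.slice (pvBits u) (some 25) (some 37)).length = 12 := by
    rw [e5]; simp [hblen]
  have hl6 : (PySem.List.slice (pvBits u) (some 37) (some 52)).length = 15 := by
    rw [e6]; simp [hblen]
  rw [ring_eq 1 3 (by norm_num) _ hl1 (halph _ _),
    ring_eq 2 4 (by norm_num) _ hl2 (halph _ _),
    ring_eq 3 8 (by norm_num) _ hl3 (halph _ _),
    ring_eq 4 10 (by norm_num) _ hl4 (halph _ _),
    ring_eq 5 12 (by norm_num) _ hl5 (halph _ _),
    ring_eq 6 15 (by norm_num) _ hl6 (halph _ _)]
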